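-- pv_equiv track=rewrite | github.com/Rohanchadha/PM-Interview-Prep-Agent | src/mailer.py | _style_html_body
-- ===== SOURCE A (Python) =====
-- def _style_html_body(raw_html: str) -> str:
--     """Apply inline styles to markdown-generated HTML tags for email compatibility."""
--     replacements = [
--         # Headings
--         ('<h1>', '<h1 style="color:#4f46e5;font-size:22px;font-weight:700;margin:28px 0 10px;padding-bottom:8px;border-bottom:2px solid #e0e7ff;">'),
--         ('<h2>', '<h2 style="color:#4f46e5;font-size:18px;font-weight:700;margin:24px 0 8px;padding-bottom:6px;border-bottom:1px solid #e0e7ff;">'),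
--         ('<h3>', '<h3 style="color:#1e293b;font-size:15px;font-weight:700;margin:20px 0 6px;">'),
--         ('<h4>', '<h4 style="color:#1e293b;font-size:14px;font-weight:600;margin:16px 0 4px;">'),
--         # Paragraphs
--         ('<p>', '<p style="margin:0 0 14px;">'),
--         # Lists
--         ('<ul>', '<ul style="margin:0 0 14px;padding-left:24px;">'),
--         ('<ol>', '<ol style="margin:0 0 14px;padding-left:24px;">'),
--         ('<li>', '<li style="margin-bottom:6px;">'),
--         # Blockquotes — callout style
--         ('<blockquote>', '<blockquote style="margin:16px 0;padding:12px 16px;background:#eef2ff;border-left:4px solid #4f46e5;border-radius:0 6px 6px 0;color:#3730a3;">'),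
--         # Code
--         ('<code>', '<code style="background:#f1f5f9;color:#be185d;padding:2px 5px;border-radius:4px;font-size:13px;font-family:\'SFMono-Regular\',Consolas,monospace;">'),
--         ('<pre>', '<pre style="background:#1e293b;color:#e2e8f0;padding:16px;border-radius:8px;overflow-x:auto;font-size:13px;line-height:1.6;margin:0 0 16px;">'),
--         # Strong / em
--         ('<strong>', '<strong style="color:#1e293b;">'),
--         # Tables
--         ('<table>', '<table style="width:100%;border-collapse:collapse;margin:0 0 16px;font-size:14px;">'),
--         ('<th>', '<th style="background:#f1f5f9;padding:10px 12px;text-align:left;font-weight:600;color:#374151;border:1px solid #e5e7eb;">'),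
--         ('<td>', '<td style="padding:10px 12px;border:1px solid #e5e7eb;color:#374151;">'),
--         ('<tr>', '<tr style="background:#ffffff;">'),
--     ]
--     for tag, styled in replacements:
--         raw_html = raw_html.replace(tag, styled)
--     return raw_html
-- ===== SOURCE B (Python) =====
-- # Single left-to-right scan: at each '<', read up to the next '>' and look the
-- # tag body up in a dict, instead of 16 sequential full-string .replace passes.
-- _STYLES = {
--     'h1': '<h1 style="color:#4f46e5;font-size:22px;font-weight:700;margin:28px 0 10px;padding-bottom:8px;border-bottom:2px solid #e0e7ff;">',
--     'h2': '<h2 style="color:#4f46e5;font-size:18px;font-weight:700;margin:24px 0 8px;padding-bottom:6px;border-bottom:1px solid #e0e7ff;">',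
--     'h3': '<h3 style="color:#1e293b;font-size:15px;font-weight:700;margin:20px 0 6px;">',
--     'h4': '<h4 style="color:#1e293b;font-size:14px;font-weight:600;margin:16px 0 4px;">',
--     'p': '<p style="margin:0 0 14px;">',
--     'ul': '<ul style="margin:0 0 14px;padding-left:24px;">',
--     'ol': '<ol style="margin:0 0 14px;padding-left:24px;">',
--     'li': '<li style="margin-bottom:6px;">',
--     'blockquote': '<blockquote style="margin:16px 0;padding:12px 16px;background:#eef2ff;border-left:4px solid #4f46e5;border-radius:0 6px 6px 0;color:#3730a3;">',
--     'code': '<code style="background:#f1f5f9;color:#be185d;padding:2px 5px;border-radius:4px;font-size:13px;font-family:\'SFMono-Regular\',Consolas,monospace;">',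
--     'pre': '<pre style="background:#1e293b;color:#e2e8f0;padding:16px;border-radius:8px;overflow-x:auto;font-size:13px;line-height:1.6;margin:0 0 16px;">',
--     'strong': '<strong style="color:#1e293b;">',
--     'table': '<table style="width:100%;border-collapse:collapse;margin:0 0 16px;font-size:14px;">',
--     'th': '<th style="background:#f1f5f9;padding:10px 12px;text-align:left;font-weight:600;color:#374151;border:1px solid #e5e7eb;">',
--     'td': '<td style="padding:10px 12px;border:1px solid #e5e7eb;color:#374151;">',
--     'tr': '<tr style="background:#ffffff;">',
-- }
--
--
-- def _style_html_body(raw_html: str) -> str: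
--     """Apply inline styles to markdown-generated HTML tags for email compatibility."""
--     out = []
--     i = 0
--     n = len(raw_html)
--     while i < n:
--         if raw_html[i] == '<':
--             j = raw_html.find('>', i + 1)
--             if j != -1:
--                 styled = _STYLES.get(raw_html[i + 1:j])
--                 if styled is not None:
--                     out.append(styled)
--                     i = j + 1
--                     continue
--         out.append(raw_html[i])
--         i += 1
--     return ''.join(out)
-- ===== Notes on version B (the rewrite author's own statement) =====
-- stated objective: alternative
-- what changed: Replaces A's 16 sequential whole-string .replace passes with a single left-to-right scan that, at each tag opener, reads the candidate tag token and looks its body up in a dict, emitting the styled tag on a hit.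
import Mathlib
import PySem

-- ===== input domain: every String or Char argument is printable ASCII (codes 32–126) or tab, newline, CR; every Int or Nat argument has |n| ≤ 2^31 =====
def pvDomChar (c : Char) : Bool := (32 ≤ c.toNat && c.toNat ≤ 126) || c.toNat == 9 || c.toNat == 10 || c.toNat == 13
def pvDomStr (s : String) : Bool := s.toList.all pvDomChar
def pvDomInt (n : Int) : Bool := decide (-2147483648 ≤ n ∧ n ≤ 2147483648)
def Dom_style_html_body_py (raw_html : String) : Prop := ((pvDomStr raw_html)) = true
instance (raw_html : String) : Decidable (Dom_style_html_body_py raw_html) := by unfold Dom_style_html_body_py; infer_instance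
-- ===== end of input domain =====

-- B replaces A's 16 sequential whole-string replace passes by one table-driven
-- left-to-right scan (alternative decomposition, not claimed faster).

-- ===== PORT A =====
-- A: the literal replacement table (tag, styled tag), then 16 sequential str.replace passes.
def pvReplacements : List (String × String) := [
  ("<h1>", "<h1 style=\"color:#4f46e5;font-size:22px;font-weight:700;margin:28px 0 10px;padding-bottom:8px;border-bottom:2px solid #e0e7ff;\">"),
  ("<h2>", "<h2 style=\"color:#4f46e5;font-size:18px;font-weight:700;margin:24px 0 8px;padding-bottom:6px;border-bottom:1px solid #e0e7ff;\">"),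
  ("<h3>", "<h3 style=\"color:#1e293b;font-size:15px;font-weight:700;margin:20px 0 6px;\">"),
  ("<h4>", "<h4 style=\"color:#1e293b;font-size:14px;font-weight:600;margin:16px 0 4px;\">"),
  ("<p>", "<p style=\"margin:0 0 14px;\">"),
  ("<ul>", "<ul style=\"margin:0 0 14px;padding-left:24px;\">"),
  ("<ol>", "<ol style=\"margin:0 0 14px;padding-left:24px;\">"),
  ("<li>", "<li style=\"margin-bottom:6px;\">"),
  ("<blockquote>", "<blockquote style=\"margin:16px 0;padding:12px 16px;background:#eef2ff;border-left:4px solid #4f46e5;border-radius:0 6px 6px 0;color:#3730a3;\">"),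
  ("<code>", "<code style=\"background:#f1f5f9;color:#be185d;padding:2px 5px;border-radius:4px;font-size:13px;font-family:'SFMono-Regular',Consolas,monospace;\">"),
  ("<pre>", "<pre style=\"background:#1e293b;color:#e2e8f0;padding:16px;border-radius:8px;overflow-x:auto;font-size:13px;line-height:1.6;margin:0 0 16px;\">"),
  ("<strong>", "<strong style=\"color:#1e293b;\">"),
  ("<table>", "<table style=\"width:100%;border-collapse:collapse;margin:0 0 16px;font-size:14px;\">"),
  ("<th>", "<th style=\"background:#f1f5f9;padding:10px 12px;text-align:left;font-weight:600;color:#374151;border:1px solid #e5e7eb;\">"),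
  ("<td>", "<td style=\"padding:10px 12px;border:1px solid #e5e7eb;color:#374151;\">"),
  ("<tr>", "<tr style=\"background:#ffffff;\">")]

-- for-loop over the table, rebinding raw_html: a left fold of str.replace
def style_html_body_py (raw_html : String) : String :=
  List.foldl (fun s p => PySem.Str.replace s p.1 p.2) raw_html pvReplacements

-- ===== PORT B =====
-- B: the dict tag-body -> styled tag (Python dict with distinct keys; ported as the
-- association list in insertion order, lookup = first match, exact here).
def pvStyles : List (List Char × List Char) := [
  (("h1").toList, ("<h1 style=\"color:#4f46e5;font-size:22px;font-weight:700;margin:28px 0 10px;padding-bottom:8px;border-bottom:2px solid #e0e7ff;\">").toList),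
  (("h2").toList, ("<h2 style=\"color:#4f46e5;font-size:18px;font-weight:700;margin:24px 0 8px;padding-bottom:6px;border-bottom:1px solid #e0e7ff;\">").toList),
  (("h3").toList, ("<h3 style=\"color:#1e293b;font-size:15px;font-weight:700;margin:20px 0 6px;\">").toList),
  (("h4").toList, ("<h4 style=\"color:#1e293b;font-size:14px;font-weight:600;margin:16px 0 4px;\">").toList),
  (("p").toList, ("<p style=\"margin:0 0 14px;\">").toList),
  (("ul").toList, ("<ul style=\"margin:0 0 14px;padding-left:24px;\">").toList),
  (("ol").toList, ("<ol style=\"margin:0 0 14px;padding-left:24px;\">").toList),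
  (("li").toList, ("<li style=\"margin-bottom:6px;\">").toList),
  (("blockquote").toList, ("<blockquote style=\"margin:16px 0;padding:12px 16px;background:#eef2ff;border-left:4px solid #4f46e5;border-radius:0 6px 6px 0;color:#3730a3;\">").toList),
  (("code").toList, ("<code style=\"background:#f1f5f9;color:#be185d;padding:2px 5px;border-radius:4px;font-size:13px;font-family:'SFMono-Regular',Consolas,monospace;\">").toList),
  (("pre").toList, ("<pre style=\"background:#1e293b;color:#e2e8f0;padding:16px;border-radius:8px;overflow-x:auto;font-size:13px;line-height:1.6;margin:0 0 16px;\">").toList),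
  (("strong").toList, ("<strong style=\"color:#1e293b;\">").toList),
  (("table").toList, ("<table style=\"width:100%;border-collapse:collapse;margin:0 0 16px;font-size:14px;\">").toList),
  (("th").toList, ("<th style=\"background:#f1f5f9;padding:10px 12px;text-align:left;font-weight:600;color:#374151;border:1px solid #e5e7eb;\">").toList),
  (("td").toList, ("<td style=\"padding:10px 12px;border:1px solid #e5e7eb;color:#374151;\">").toList),
  (("tr").toList, ("<tr style=\"background:#ffffff;\">").toList)]

-- hand port of `raw_html.find('>', i+1)` on the suffix after '<': the characters before
-- the first '>' and the remainder after it (none = no '>', find returned -1); exact.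
def pvTagSplit : List Char → Option (List Char × List Char)
  | [] => none
  | c :: t => if c = '>' then some ([], t) else (pvTagSplit t).map (fun p => (c :: p.1, p.2))

-- dict.get: first (unique) matching key
def pvLookup (tb : List (List Char × List Char)) (w : List Char) : Option (List Char) :=
  match tb with
  | [] => none
  | p :: t => if p.1 = w then some p.2 else pvLookup t w

-- termination fact for the scanner (cited by pvScanD's decreasing_by)
theorem pvTagSplit_len : ∀ {t tag rest : List Char}, pvTagSplit t = some (tag, rest) → rest.length ≤ t.length := by
  intro t
  induction t with
  | nil => intro tag rest h; simp [pvTagSplit] at h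
  | cons c t ih =>
    intro tag rest h
    by_cases hc : c = '>'
    · simp [pvTagSplit, hc] at h
      simp [← h.2]
    · simp only [pvTagSplit, if_neg hc, Option.map_eq_some_iff] at h
      obtain ⟨⟨p, q⟩, hp, hrest⟩ := h
      have hq : q.length ≤ t.length := ih hp
      simp only [Prod.mk.injEq] at hrest
      obtain ⟨h1, h2⟩ := hrest
      subst h2
      simp only [List.length_cons]
      omega

-- B's while-loop over the string: at '<', read up to the next '>', look the body up,
-- on a hit emit the styled tag and resume after the '>'; otherwise emit the char.
def pvScanD (tb : List (List Char × List Char)) : List Char → List Char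
  | [] => []
  | c :: t =>
    if c = '<' then
      match htag : pvTagSplit t with
      | some (tag, rest) =>
        match pvLookup tb tag with
        | some r => r ++ pvScanD tb rest
        | none => c :: pvScanD tb t
      | none => c :: pvScanD tb t
    else c :: pvScanD tb t
termination_by s => s.length
decreasing_by
  · exact Nat.lt_succ_of_le (pvTagSplit_len htag)
  · simp
  · simp
  · simp

def style_html_body_py_alt (raw_html : String) : String :=
  String.mk (pvScanD pvStyles raw_html.toList)

-- ===== PRECONDITION & SPEC =====
def Spec_style_html_body_py (raw_html : String) (out : String) : Prop := out = style_html_body_py_alt raw_html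
instance (raw_html : String) (out : String) : Decidable (Spec_style_html_body_py raw_html out) := by unfold Spec_style_html_body_py; infer_instance

-- ===== CLAIM (what is proved, stated in full; the proofs are below) =====
def Claim_equal_style_html_body_py : Prop := ∀ (raw_html : String), Dom_style_html_body_py raw_html → Spec_style_html_body_py raw_html (style_html_body_py raw_html)

-- ===== LEMMAS AND PROOFS =====

-- `w` is free of the tag delimiters
def pvNoLG (w : List Char) : Bool := w.all fun c => c ≠ '<' && c ≠ '>'

theorem pvNoLG_iff {w : List Char} : pvNoLG w = true ↔ ∀ c ∈ w, c ≠ '<' ∧ c ≠ '>' := by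
  simp [pvNoLG]

-- the model of one str.replace pass with a tag-shaped key and value (proof layer only)
def pvRep (w v : List Char) : List Char → List Char
  | [] => []
  | c :: t =>
    if ('<' :: (w ++ ['>'])) <+: (c :: t) then
      ('<' :: (v ++ ['>'])) ++ pvRep w v (t.drop (w.length + 1))
    else c :: pvRep w v t
termination_by s => s.length
decreasing_by
  · simp
  · simp

-- shape lemmas -------------------------------------------------------------

theorem pvTagSplit_some : ∀ {t tag rest : List Char}, pvTagSplit t = some (tag, rest) →
    t = tag ++ '>' :: rest ∧ '>' ∉ tag := by
  intro t
  induction t with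
  | nil => intro tag rest h; simp [pvTagSplit] at h
  | cons c t ih =>
    intro tag rest h
    by_cases hc : c = '>'
    · subst hc
      simp [pvTagSplit] at h
      obtain ⟨h1, h2⟩ := h
      subst h1; subst h2
      simp
    · simp only [pvTagSplit, if_neg hc, Option.map_eq_some_iff] at h
      obtain ⟨⟨p, q⟩, hp, heq⟩ := h
      simp only [Prod.mk.injEq] at heq
      obtain ⟨h1, h2⟩ := heq
      subst h1; subst h2
      obtain ⟨ht, hm⟩ := ih hp
      subst ht
      refine ⟨by simp, ?_⟩
      simp only [List.mem_cons]
      rintro (h | h)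
      · exact hc h.symm
      · exact hm h

theorem pvTagSplit_of : ∀ {tag : List Char} (rest : List Char), '>' ∉ tag →
    pvTagSplit (tag ++ '>' :: rest) = some (tag, rest) := by
  intro tag
  induction tag with
  | nil => intro rest h; simp [pvTagSplit]
  | cons a tag ih =>
    intro rest h
    simp only [List.mem_cons, not_or] at h
    have ha : a ≠ '>' := fun hh => h.1 hh.symm
    simp only [List.cons_append, pvTagSplit, if_neg ha, ih rest h.2, Option.map_some]

theorem pvTagSplit_none : ∀ {t : List Char}, pvTagSplit t = none ↔ '>' ∉ t := by
  intro t
  induction t with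
  | nil => simp [pvTagSplit]
  | cons c t ih =>
    by_cases hc : c = '>'
    · subst hc; simp [pvTagSplit]
    · have hc' : '>' ≠ c := fun h => hc h.symm
      simp [pvTagSplit, hc, Option.map_eq_none_iff, ih, hc']

theorem pvScanD_nil (tb : List (List Char × List Char)) : pvScanD tb [] = [] := by
  rw [pvScanD]

theorem pvScanD_cons_not_lt {c : Char} (tb : List (List Char × List Char)) (t : List Char)
    (hc : c ≠ '<') : pvScanD tb (c :: t) = c :: pvScanD tb t := by
  rw [pvScanD, if_neg hc]

theorem pvScanD_cons_none (tb : List (List Char × List Char)) {t : List Char}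
    (htag : pvTagSplit t = none) : pvScanD tb ('<' :: t) = '<' :: pvScanD tb t := by
  rw [pvScanD, if_pos rfl]
  split <;> simp_all

theorem pvScanD_cons_some_none (tb : List (List Char × List Char)) {t tag rest : List Char}
    (htag : pvTagSplit t = some (tag, rest)) (hlk : pvLookup tb tag = none) :
    pvScanD tb ('<' :: t) = '<' :: pvScanD tb t := by
  rw [pvScanD, if_pos rfl]
  split
  · next tag' rest' heq =>
    rw [htag] at heq
    injection heq with heq2
    injection heq2 with h1 h2
    subst h1; subst h2
    split <;> simp_all
  · simp_all

theorem pvScanD_cons_some_some (tb : List (List Char × List Char)) {t tag rest r : List Char}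
    (htag : pvTagSplit t = some (tag, rest)) (hlk : pvLookup tb tag = some r) :
    pvScanD tb ('<' :: t) = r ++ pvScanD tb rest := by
  rw [pvScanD, if_pos rfl]
  split
  · next tag' rest' heq =>
    rw [htag] at heq
    injection heq with heq2
    injection heq2 with h1 h2
    subst h1; subst h2
    split <;> simp_all
  · simp_all

theorem pvRep_nil (w v : List Char) : pvRep w v [] = [] := by
  rw [pvRep]

theorem pvRep_cons_pos (w v : List Char) {c : Char} {t : List Char}
    (h : ('<' :: (w ++ ['>'])) <+: (c :: t)) :
    pvRep w v (c :: t) = ('<' :: (v ++ ['>'])) ++ pvRep w v (t.drop (w.length + 1)) := by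
  rw [pvRep]
  simp [h]

theorem pvRep_cons_neg (w v : List Char) {c : Char} {t : List Char}
    (h : ¬ ('<' :: (w ++ ['>'])) <+: (c :: t)) :
    pvRep w v (c :: t) = c :: pvRep w v t := by
  rw [pvRep]
  simp [h]

-- lookup lemmas ------------------------------------------------------------

theorem pvLookup_mem : ∀ {tb : List (List Char × List Char)} {k r : List Char},
    pvLookup tb k = some r → (k, r) ∈ tb := by
  intro tb
  induction tb with
  | nil => intro k r h; simp [pvLookup] at h
  | cons p t ih =>
    intro k r h
    by_cases hp : p.1 = k
    · simp only [pvLookup, if_pos hp, Option.some.injEq] at h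
      subst h; subst hp
      simp
    · simp only [pvLookup, if_neg hp] at h
      exact List.mem_cons_of_mem _ (ih h)

theorem pvLookup_none_of_forall_ne : ∀ {tb : List (List Char × List Char)} {k : List Char},
    (∀ q ∈ tb, k ≠ q.1) → pvLookup tb k = none := by
  intro tb
  induction tb with
  | nil => intro k _; rfl
  | cons p t ih =>
    intro k h
    have hp : p.1 ≠ k := fun hh => h p (by simp) hh.symm
    simp only [pvLookup, if_neg hp]
    exact ih fun q hq => h q (List.mem_cons_of_mem _ hq)

theorem pvLookup_none_of_mem_lt {tb : List (List Char × List Char)} {k : List Char}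
    (hk : '<' ∈ k) (hkeys : ∀ p ∈ tb, pvNoLG p.1 = true) : pvLookup tb k = none := by
  apply pvLookup_none_of_forall_ne
  intro q hq he
  subst he
  exact ((pvNoLG_iff.mp (hkeys q hq)) '<' hk).1 rfl

-- prefix decomposition -----------------------------------------------------

theorem pvPFX {K a z : List Char} (h : K <+: a ++ z) :
    K <+: a ∨ (a <+: K ∧ K.drop a.length <+: z) := by
  by_cases hl : K.length ≤ a.length
  · exact Or.inl ((List.isPrefix_append_of_length hl).mp h)
  · right
    have ha : a <+: K :=
      List.prefix_of_prefix_length_le (List.prefix_append a z) h (by omega)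
    refine ⟨ha, ?_⟩
    obtain ⟨u, hu⟩ := ha
    have hdrop : K.drop a.length = u := by rw [← hu, List.drop_left]
    rw [hdrop]
    rw [← hu] at h
    exact (List.prefix_append_right_inj a).mp h

-- a key (u ++ ['>'], '>' free in u) matches at the start of tag ++ '>'::z iff tag = u
theorem pvKeyPrefix {u tag z : List Char} (hu : '>' ∉ u) (htag : '>' ∉ tag) :
    (u ++ ['>']) <+: (tag ++ '>' :: z) ↔ tag = u := by
  constructor
  · intro h
    rcases pvPFX h with h1 | ⟨h1, h2⟩
    · exact absurd (h1.subset (by simp)) htag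
    · have hlen : tag.length ≤ u.length + 1 := by
        have := h1.length_le
        simpa using this
      by_cases he : tag.length = u.length + 1
      · have : tag = u ++ ['>'] := h1.eq_of_length (by simpa using he)
        rw [this] at htag
        simp at htag
      · by_cases he2 : tag.length = u.length
        · have htu : tag <+: u :=
            List.prefix_of_prefix_length_le h1 (List.prefix_append u ['>']) (by omega)
          exact htu.eq_of_length he2
        · have hlt : tag.length < u.length := by omega
          rw [List.drop_append_of_le_length (by omega)] at h2
          have hne : u.drop tag.length ≠ [] := by
            simp only [ne_eq, List.drop_eq_nil_iff]
            omega
          obtain ⟨d0, d', hd⟩ := List.exists_cons_of_ne_nil hne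
          rw [hd] at h2
          have : d0 = '>' := (List.cons_prefix_cons.mp (by simpa using h2)).1
          have hmem : d0 ∈ u := by
            have : d0 ∈ u.drop tag.length := by rw [hd]; simp
            exact List.mem_of_mem_drop this
          rw [this] at hmem
          exact absurd hmem hu
  · intro h
    subst h
    exact ⟨z, by simp⟩

-- pvRep structure ----------------------------------------------------------

theorem pvRep_append (w v : List Char) : ∀ y z : List Char,
    (∀ y1 y2, y = y1 ++ y2 → y2 ≠ [] → ¬ ('<' :: (w ++ ['>'])) <+: (y2 ++ z)) →
    pvRep w v (y ++ z) = y ++ pvRep w v z := by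
  intro y
  induction y with
  | nil => intro z _; simp
  | cons a y ih =>
    intro z hcond
    have hnp : ¬ ('<' :: (w ++ ['>'])) <+: ((a :: y) ++ z) :=
      hcond [] (a :: y) rfl (by simp)
    rw [List.cons_append, pvRep_cons_neg w v (by simpa using hnp)]
    rw [ih z fun y1 y2 h1 h2 => hcond (a :: y1) y2 (by rw [h1]; rfl) h2]
    rfl

theorem pvRep_no_gt (w v : List Char) : ∀ {t : List Char}, '>' ∉ t → pvRep w v t = t := by
  intro t
  induction t with
  | nil => intro _; exact pvRep_nil w v
  | cons c t ih =>
    intro h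
    have hnp : ¬ ('<' :: (w ++ ['>'])) <+: (c :: t) := by
      intro hk
      exact h (hk.subset (by simp))
    rw [pvRep_cons_neg w v hnp]
    simp only [List.mem_cons, not_or] at h
    rw [ih h.2]

-- the Chars.replace primitive equals the pvRep model for a tag-shaped key
theorem pvGo (w v : List Char) : ∀ (fuel : Nat) (l acc : List Char), l.length ≤ fuel →
    PySem.Chars.replace.go ('<' :: (w ++ ['>'])) ('<' :: (v ++ ['>'])) fuel l acc =
      acc.reverse ++ pvRep w v l := by
  intro fuel
  induction fuel with
  | zero =>
    intro l acc h
    have : l = [] := by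
      cases l with
      | nil => rfl
      | cons c t => simp at h
    subst this
    simp [PySem.Chars.replace.go, pvRep_nil]
  | succ n ih =>
    intro l acc h
    cases l with
    | nil => simp [PySem.Chars.replace.go, pvRep_nil]
    | cons c t =>
      rw [PySem.Chars.replace.go]
      by_cases hp : ('<' :: (w ++ ['>'])) <+: (c :: t)
      · rw [if_pos (List.isPrefixOf_iff_prefix.mpr hp)]
        have hlen : ('<' :: (w ++ ['>'])).length = w.length + 2 := by simp
        rw [hlen]
        have hdrop : (c :: t).drop (w.length + 2) = t.drop (w.length + 1) := by
          simp [List.drop_succ_cons]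
        rw [hdrop]
        rw [ih _ _ (by simp at h ⊢; omega)]
        rw [pvRep_cons_pos w v hp]
        simp
      · rw [if_neg (fun hh => hp (List.isPrefixOf_iff_prefix.mp hh))]
        rw [ih _ _ (by simp at h ⊢; omega)]
        rw [pvRep_cons_neg w v hp]
        simp

theorem pvRep_eq (w v : List Char) (s : List Char) :
    PySem.Chars.replace s ('<' :: (w ++ ['>'])) ('<' :: (v ++ ['>'])) = pvRep w v s := by
  rw [PySem.Chars.replace]
  rw [if_neg (by simp)]
  rw [pvGo w v s.length s [] (Nat.le_refl _)]
  rfl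

-- pvScanD structure --------------------------------------------------------

theorem pvScanD_nil_table_aux : ∀ (n : Nat) (s : List Char), s.length ≤ n → pvScanD [] s = s := by
  intro n
  induction n with
  | zero =>
    intro s hs
    have : s = [] := by
      cases s with
      | nil => rfl
      | cons c t => simp at hs
    subst this
    exact pvScanD_nil []
  | succ n ih =>
    intro s hs
    cases s with
    | nil => exact pvScanD_nil []
    | cons c t =>
      simp only [List.length_cons, Nat.succ_le_succ_iff] at hs
      by_cases hc : c = '<'
      · subst hc
        cases htag : pvTagSplit t with
        | none => rw [pvScanD_cons_none [] htag, ih t hs]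
        | some pr =>
          obtain ⟨tag, rest⟩ := pr
          rw [pvScanD_cons_some_none [] htag rfl, ih t hs]
      · rw [pvScanD_cons_not_lt [] t hc, ih t hs]

theorem pvScanD_nil_table : ∀ s : List Char, pvScanD [] s = s := fun s =>
  pvScanD_nil_table_aux s.length s (Nat.le_refl _)

theorem pvScanD_append_no_lt (tb : List (List Char × List Char)) :
    ∀ y X : List Char, (∀ c ∈ y, c ≠ '<') → pvScanD tb (y ++ X) = y ++ pvScanD tb X := by
  intro y
  induction y with
  | nil => intro X _; simp
  | cons a y ih =>
    intro X h
    rw [List.cons_append, pvScanD_cons_not_lt tb _ (h a (by simp))]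
    rw [ih X fun c hc => h c (List.mem_cons_of_mem _ hc)]
    rfl

theorem pvScanD_styled (tb : List (List Char × List Char)) {v : List Char} (X : List Char)
    (hv : pvNoLG v = true) (hlk : pvLookup tb v = none) :
    pvScanD tb (('<' :: (v ++ ['>'])) ++ X) = ('<' :: (v ++ ['>'])) ++ pvScanD tb X := by
  have hgt : '>' ∉ v := fun h => (pvNoLG_iff.mp hv '>' h).2 rfl
  have hsplit : pvTagSplit (v ++ '>' :: X) = some (v, X) := pvTagSplit_of X hgt
  have h1 : ('<' :: (v ++ ['>'])) ++ X = '<' :: (v ++ '>' :: X) := by simp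
  rw [h1, pvScanD_cons_some_none tb hsplit hlk]
  rw [pvScanD_append_no_lt tb v ('>' :: X) fun c hc => (pvNoLG_iff.mp hv c hc).1]
  rw [pvScanD_cons_not_lt tb X (by decide)]
  simp

-- the crux: one replace pass absorbed into the table-driven scanner ---------

theorem pvDropTag (w : List Char) (rest : List Char) :
    (w ++ '>' :: rest).drop (w.length + 1) = rest := by
  simp [List.drop_append]

theorem pvSuffixShape {tag y1 y2 : List Char} (heq : tag ++ ['>'] = y1 ++ y2)
    (hne : y2 ≠ []) : ∃ t2, y2 = t2 ++ ['>'] ∧ y1 ++ t2 = tag := by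
  rcases y2.eq_nil_or_concat with h | ⟨t2, a, h⟩
  · exact absurd h hne
  · subst h
    have heq2 : tag ++ ['>'] = (y1 ++ t2) ++ [a] := by rw [heq]; simp
    have ha : a = '>' := by
      have h3 := congrArg List.getLast? heq2
      simp only [List.getLast?_concat] at h3
      injection h3 with h4
      exact h4.symm
    subst ha
    exact ⟨t2, by simp, (List.append_cancel_right heq2).symm⟩

-- one replace pass walks over `tag ++ '>'::rest` untouched up to the '>',
-- provided the key's body is not a suffix of tag
theorem pvRep_tag (w v tag rest : List Char) (hwgt : '>' ∉ w) (hgtag : '>' ∉ tag)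
    (hno : ¬ ('<' :: w) <:+ tag) :
    pvRep w v (tag ++ '>' :: rest) = tag ++ '>' :: pvRep w v rest := by
  have hshape : tag ++ '>' :: rest = (tag ++ ['>']) ++ rest := by simp
  rw [hshape]
  rw [pvRep_append w v (tag ++ ['>']) rest ?_]
  · simp
  · intro y1 y2 heq hne hk
    obtain ⟨t2, hy2, ht2⟩ := pvSuffixShape heq hne
    rw [hy2] at hk
    have hk' : (('<' :: w) ++ ['>']) <+: (t2 ++ '>' :: rest) := by
      simpa using hk
    have hgt2 : '>' ∉ t2 := fun hm => hgtag (by rw [← ht2]; exact List.mem_append_right _ hm)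
    have := (pvKeyPrefix (by simp [hwgt]) hgt2).mp hk'
    exact hno ⟨y1, by rw [← ht2, this]⟩

theorem pvCrux (w v : List Char) (tb : List (List Char × List Char))
    (hw : pvNoLG w = true) (hv : pvNoLG v = true)
    (hkeys : ∀ p ∈ tb, pvNoLG p.1 = true)
    (hvtb : pvLookup tb v = none) :
    ∀ n : Nat, ∀ s : List Char, s.length ≤ n →
      pvScanD tb (pvRep w v s) = pvScanD ((w, '<' :: (v ++ ['>'])) :: tb) s := by
  have hwgt : '>' ∉ w := fun h => (pvNoLG_iff.mp hw '>' h).2 rfl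
  have hvgt : '>' ∉ v := fun h => (pvNoLG_iff.mp hv '>' h).2 rfl
  intro n
  induction n with
  | zero =>
    intro s hs
    have : s = [] := by
      cases s with
      | nil => rfl
      | cons c t => simp at hs
    subst this
    rw [pvRep_nil, pvScanD_nil, pvScanD_nil]
  | succ n ih =>
    intro s hs
    cases s with
    | nil => rw [pvRep_nil, pvScanD_nil, pvScanD_nil]
    | cons c t =>
      simp only [List.length_cons, Nat.succ_le_succ_iff] at hs
      by_cases hc : c = '<'
      · subst hc
        cases htag : pvTagSplit t with
        | none =>
          have hgt : '>' ∉ t := pvTagSplit_none.mp htag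
          have hnp : ¬ ('<' :: (w ++ ['>'])) <+: ('<' :: t) := by
            intro hk
            have hmem : '>' ∈ '<' :: t := hk.subset (by simp)
            simp only [List.mem_cons] at hmem
            rcases hmem with h | h
            · exact absurd h.symm (by decide)
            · exact hgt h
          rw [pvRep_cons_neg w v hnp]
          have hreptag : pvTagSplit (pvRep w v t) = none := by
            rw [pvRep_no_gt w v hgt]
            exact htag
          rw [pvScanD_cons_none tb hreptag, pvScanD_cons_none _ htag]
          rw [ih t hs]
        | some pr =>
          obtain ⟨tag, rest⟩ := pr
          obtain ⟨ht, hgtag⟩ := pvTagSplit_some htag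
          have hrest : rest.length ≤ n := by
            have h1 := pvTagSplit_len htag
            subst ht
            simp only [List.length_append, List.length_cons] at hs
            omega
          by_cases hwt : tag = w
          · -- the head key matches here: both sides consume it
            have hpre : ('<' :: (w ++ ['>'])) <+: ('<' :: t) := by
              rw [ht, hwt]
              exact List.cons_prefix_cons.mpr ⟨rfl, ⟨rest, by simp⟩⟩
            rw [pvRep_cons_pos w v hpre]
            have hdrop : t.drop (w.length + 1) = rest := by
              rw [ht, hwt]
              exact pvDropTag w rest
            rw [hdrop]
            rw [pvScanD_styled tb _ hv hvtb]
            rw [ih rest hrest]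
            have hlkw : pvLookup ((w, '<' :: (v ++ ['>'])) :: tb) tag =
                some ('<' :: (v ++ ['>'])) := by
              simp [pvLookup, hwt]
            rw [pvScanD_cons_some_some _ htag hlkw]
          · -- the head key does not match at this position
            have hnp : ¬ ('<' :: (w ++ ['>'])) <+: ('<' :: t) := by
              intro hk
              have h2 : (w ++ ['>']) <+: t := (List.cons_prefix_cons.mp hk).2
              rw [ht] at h2
              exact hwt ((pvKeyPrefix hwgt hgtag).mp h2)
            rw [pvRep_cons_neg w v hnp]
            have hlkcons : pvLookup ((w, '<' :: (v ++ ['>'])) :: tb) tag = pvLookup tb tag := by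
              simp only [pvLookup]
              rw [if_neg (fun hh => hwt hh.symm)]
            cases hlk : pvLookup tb tag with
            | some r2 =>
              -- an inner key fires at this position on both sides
              have htagn : pvNoLG tag = true := hkeys (tag, r2) (pvLookup_mem hlk)
              have hno : ¬ ('<' :: w) <:+ tag := by
                rintro ⟨pre, hpre⟩
                have : '<' ∈ tag := by rw [← hpre]; simp
                exact ((pvNoLG_iff.mp htagn) '<' this).1 rfl
              have hrep : pvRep w v t = tag ++ '>' :: pvRep w v rest := by
                rw [ht]
                exact pvRep_tag w v tag rest hwgt hgtag hno
              rw [hrep]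
              rw [pvScanD_cons_some_some tb (pvTagSplit_of (pvRep w v rest) hgtag) hlk]
              rw [ih rest hrest]
              rw [pvScanD_cons_some_some _ htag (hlkcons.trans hlk)]
            | none =>
              -- no key fires: both sides emit '<' and continue after it
              by_cases hsfx : ('<' :: w) <:+ tag
              · -- the head key fires later, inside `tag ++ '>'`; the replacement
                -- re-creates a tag-shaped span whose body contains '<'
                obtain ⟨pre, hpre⟩ := hsfx
                have hT : t = pre ++ (('<' :: (w ++ ['>'])) ++ rest) := by
                  rw [ht, ← hpre]
                  simp
                have hgtpre : '>' ∉ pre := fun hm => hgtag (by rw [← hpre]; exact List.mem_append_left _ hm)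
                have hrep : pvRep w v t = pre ++ (('<' :: (v ++ ['>'])) ++ pvRep w v rest) := by
                  rw [hT]
                  rw [pvRep_append w v pre _ ?_]
                  · congr 1
                    have hx : ('<' :: (w ++ ['>'])) ++ rest = '<' :: (w ++ '>' :: rest) := by simp
                    rw [hx]
                    rw [pvRep_cons_pos w v (by rw [← hx]; exact ⟨rest, rfl⟩)]
                    rw [pvDropTag w rest]
                  · intro y1 y2 heq hne hk
                    have hk' : (('<' :: w) ++ ['>']) <+: ((y2 ++ '<' :: w) ++ '>' :: rest) := by
                      have : y2 ++ (('<' :: (w ++ ['>'])) ++ rest) = (y2 ++ '<' :: w) ++ '>' :: rest := by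
                        simp
                      rw [← this]
                      simpa using hk
                    have hgty2 : '>' ∉ y2 ++ '<' :: w := by
                      simp only [List.mem_append, List.mem_cons, not_or]
                      exact ⟨fun hm => hgtpre (heq ▸ List.mem_append_right _ hm), by decide, hwgt⟩
                    have heq2 := (pvKeyPrefix (by simp [hwgt]) hgty2).mp hk'
                    apply hne
                    have hlen := congrArg List.length heq2
                    simp only [List.length_append, List.length_cons] at hlen
                    have hz : y2.length = 0 := by omega
                    exact List.eq_nil_of_length_eq_zero hz
                rw [hrep]
                have hsplit2 : pvTagSplit ((pre ++ '<' :: v) ++ '>' :: pvRep w v rest) =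
                    some (pre ++ '<' :: v, pvRep w v rest) := by
                  apply pvTagSplit_of
                  simp only [List.mem_append, List.mem_cons, not_or]
                  exact ⟨hgtpre, by decide, hvgt⟩
                have hshape2 : pre ++ (('<' :: (v ++ ['>'])) ++ pvRep w v rest) =
                    (pre ++ '<' :: v) ++ '>' :: pvRep w v rest := by simp
                rw [hshape2]
                have hlk2 : pvLookup tb (pre ++ '<' :: v) = none :=
                  pvLookup_none_of_mem_lt (by simp) hkeys
                rw [pvScanD_cons_some_none tb hsplit2 hlk2]
                rw [← hshape2, ← hrep]
                rw [ih t hs]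
                rw [pvScanD_cons_some_none _ htag (hlkcons.trans hlk)]
              · -- the head key does not fire anywhere in `tag ++ '>'`
                have hrep : pvRep w v t = tag ++ '>' :: pvRep w v rest := by
                  rw [ht]
                  exact pvRep_tag w v tag rest hwgt hgtag hsfx
                rw [hrep]
                rw [pvScanD_cons_some_none tb (pvTagSplit_of (pvRep w v rest) hgtag) hlk]
                rw [← hrep, ih t hs]
                rw [pvScanD_cons_some_none _ htag (hlkcons.trans hlk)]
      · have hnp : ¬ ('<' :: (w ++ ['>'])) <+: (c :: t) := by
          intro hk
          exact hc (List.cons_prefix_cons.mp hk).1.symm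
        rw [pvRep_cons_neg w v hnp]
        rw [pvScanD_cons_not_lt tb _ hc, pvScanD_cons_not_lt _ _ hc]
        rw [ih t hs]

-- the fold of replace passes equals the scanner ----------------------------

theorem pvGen : ∀ tb : List (List Char × List Char),
    (∀ p ∈ tb, pvNoLG p.1 = true) →
    (∀ p ∈ tb, p.2 = '<' :: (((p.2.drop 1).dropLast) ++ ['>']) ∧ pvNoLG ((p.2.drop 1).dropLast) = true ∧
      ∀ q ∈ tb, (p.2.drop 1).dropLast ≠ q.1) →
    ∀ s : List Char,
      List.foldl (fun s p => PySem.Chars.replace s ('<' :: (p.1 ++ ['>'])) p.2) s tb = pvScanD tb s := by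
  intro tb
  induction tb with
  | nil => intro _ _ s; rw [List.foldl_nil, pvScanD_nil_table]
  | cons p tb ih =>
    intro hk hr s
    obtain ⟨hshape, hvnolg, hvne⟩ := hr p (by simp)
    rw [List.foldl_cons]
    have hk' : ∀ q ∈ tb, pvNoLG q.1 = true := fun q hq => hk q (List.mem_cons_of_mem _ hq)
    rw [ih hk' (fun q hq => by
      obtain ⟨a, b, c⟩ := hr q (List.mem_cons_of_mem _ hq)
      exact ⟨a, b, fun q' hq' => c q' (List.mem_cons_of_mem _ hq')⟩)]
    obtain ⟨w, hp⟩ : ∃ w, p = (w, p.2) := ⟨p.1, rfl⟩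
    set v := (p.2.drop 1).dropLast with hvdef
    rw [hshape]
    rw [pvRep_eq p.1 v s]
    have hvtb : pvLookup tb v = none :=
      pvLookup_none_of_forall_ne fun q hq => hvne q (List.mem_cons_of_mem _ hq)
    have := pvCrux p.1 v tb (hk p (by simp)) hvnolg hk' hvtb s.length s (Nat.le_refl _)
    rw [this]
    have hpp : p = (p.1, '<' :: (v ++ ['>'])) := by
      rw [← hshape]
    rw [← hpp]

-- concrete table facts -----------------------------------------------------

set_option maxRecDepth 8000 in
set_option maxHeartbeats 4000000 in
theorem pvStyles_keys_b : (pvStyles.all fun p => pvNoLG p.1) = true := by rfl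

set_option maxRecDepth 8000 in
set_option maxHeartbeats 4000000 in
theorem pvStyles_vals_b : (pvStyles.all fun p =>
    (p.2 == '<' :: (((p.2.drop 1).dropLast) ++ ['>'])) && pvNoLG ((p.2.drop 1).dropLast) &&
      (pvStyles.all fun q => !((p.2.drop 1).dropLast == q.1))) = true := by rfl

set_option maxRecDepth 8000 in
set_option maxHeartbeats 4000000 in
theorem pvTables_b : (pvReplacements.map (fun p => (p.1.toList, p.2.toList)) ==
    pvStyles.map (fun p => (('<' :: (p.1 ++ ['>'])), p.2))) = true := by rfl

theorem pvStyles_keys : ∀ p ∈ pvStyles, pvNoLG p.1 = true := by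
  have := pvStyles_keys_b
  simpa [List.all_eq_true] using this

theorem pvStyles_vals : ∀ p ∈ pvStyles, p.2 = '<' :: (((p.2.drop 1).dropLast) ++ ['>']) ∧
    pvNoLG ((p.2.drop 1).dropLast) = true ∧ ∀ q ∈ pvStyles, (p.2.drop 1).dropLast ≠ q.1 := by
  have h := pvStyles_vals_b
  rw [List.all_eq_true] at h
  intro p hp
  have := h p hp
  simp only [Bool.and_eq_true, List.all_eq_true, Bool.not_eq_true', beq_eq_false_iff_ne,
    beq_iff_eq] at this
  exact ⟨this.1.1, this.1.2, this.2⟩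

theorem pvTables : pvReplacements.map (fun p => (p.1.toList, p.2.toList)) =
    pvStyles.map (fun p => (('<' :: (p.1 ++ ['>'])), p.2)) := eq_of_beq pvTables_b

-- A-side bridge: string fold to char-list fold ------------------------------

theorem pvFold_toList : ∀ (tb : List (String × String)) (r : String),
    (List.foldl (fun s p => PySem.Str.replace s p.1 p.2) r tb).toList =
      List.foldl (fun s p => PySem.Chars.replace s p.1 p.2) r.toList
        (tb.map (fun p => (p.1.toList, p.2.toList))) := by
  intro tb
  induction tb with
  | nil => intro r; simp
  | cons p tb ih =>
    intro r
    rw [List.foldl_cons, List.map_cons, List.foldl_cons, ih]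
    simp [PySem.Str.toList_replace]

-- ===== VERDICT (by name: the statement is the Claim_ definition above) =====
theorem style_html_body_py_spec : Claim_equal_style_html_body_py := by
  unfold Claim_equal_style_html_body_py
  intro raw _
  unfold Spec_style_html_body_py
  apply String.toList_inj.mp
  rw [style_html_body_py, style_html_body_py_alt]
  rw [pvFold_toList, pvTables, List.foldl_map]
  rw [pvGen pvStyles pvStyles_keys pvStyles_vals raw.toList]
  have h : (String.mk (pvScanD pvStyles raw.toList)).toList = pvScanD pvStyles raw.toList :=
    (String.ofList_eq.mp rfl).symm
  exact h.symm
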